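-- pv_equiv track=rewrite | github.com/gitlevich/SigilAtlasV | python/sigil_atlas/layout.py | _xy_to_hilbert
-- ===== SOURCE A (Python) =====
-- def _xy_to_hilbert(n: int, x: int, y: int) -> int:
--     """Convert (x, y) grid coordinates to Hilbert curve index. n must be a power of 2."""
--     d = 0
--     s = n // 2
--     while s > 0:
--         rx = 1 if (x & s) > 0 else 0
--         ry = 1 if (y & s) > 0 else 0
--         d += s * s * ((3 * rx) ^ ry)
--         if ry == 0:
--             if rx == 1:
--                 x = s - 1 - x
--                 y = s - 1 - y
--             x, y = y, x
--         s //= 2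
--     return d
-- ===== SOURCE B (Python) =====
-- def _xy_to_hilbert(n: int, x: int, y: int) -> int:
--     """Convert (x, y) grid coordinates to Hilbert curve index. n must be a power of 2.
--
--     Recursive divide-and-conquer over quadrants: resolve the top-level quadrant,
--     rotate/reflect the coordinates into it, and recurse on the half-size grid.
--     """
--     s = n // 2
--     if s <= 0:
--         return 0
--     rx = 1 if (x & s) > 0 else 0
--     ry = 1 if (y & s) > 0 else 0
--     if ry == 0:
--         if rx == 1:
--             x, y = s - 1 - x, s - 1 - y
--         x, y = y, x
--     return s * s * ((3 * rx) ^ ry) + _xy_to_hilbert(s, x, y)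
-- ===== Notes on version B (the rewrite author's own statement) =====
-- stated objective: alternative
-- what changed: Replaced the iterative accumulator loop over halving cell sizes with a recursive divide-and-conquer over quadrants: each call resolves the top-level quadrant, rotates the coordinates, and recurses on the half-size grid.
import Mathlib
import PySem

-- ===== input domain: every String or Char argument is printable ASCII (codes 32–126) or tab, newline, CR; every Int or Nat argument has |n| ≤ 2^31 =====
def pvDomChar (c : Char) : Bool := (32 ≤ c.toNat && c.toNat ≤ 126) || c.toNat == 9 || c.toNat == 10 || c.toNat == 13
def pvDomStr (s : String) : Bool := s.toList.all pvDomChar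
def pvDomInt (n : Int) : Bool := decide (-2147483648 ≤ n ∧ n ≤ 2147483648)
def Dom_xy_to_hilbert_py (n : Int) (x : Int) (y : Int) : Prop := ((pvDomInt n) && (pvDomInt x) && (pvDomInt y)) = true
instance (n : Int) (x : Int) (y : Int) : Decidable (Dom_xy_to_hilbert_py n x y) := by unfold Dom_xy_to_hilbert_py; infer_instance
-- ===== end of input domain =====

-- B replaces A's iterative accumulator loop by a recursive divide-and-conquer over
-- quadrants (same rotation, recursion on the half-size grid); objective: alternative.

-- ===== PORT A =====
-- the while loop of A, state (s, x, y, d)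
def hilbLoopA (s x y d : Int) : Int :=
  if hs : 0 < s then
    let rx : Int := if 0 < PySem.Int.band x s then 1 else 0
    let ry : Int := if 0 < PySem.Int.band y s then 1 else 0
    let d' := d + s * s * PySem.Int.bxor (3 * rx) ry
    let p : Int × Int :=
      if ry = 0 then
        let q : Int × Int := if rx = 1 then (s - 1 - x, s - 1 - y) else (x, y)
        (q.2, q.1)
      else (x, y)
    hilbLoopA (PySem.Int.floordiv s 2) p.1 p.2 d'
  else d
termination_by s.toNat
decreasing_by
  simp only [PySem.Int.floordiv_eq_ediv_of_pos (by omega : (0:Int) < 2)]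
  omega

def xy_to_hilbert_py (n : Int) (x : Int) (y : Int) : Int :=
  hilbLoopA (PySem.Int.floordiv n 2) x y 0

-- ===== PORT B =====
def xy_to_hilbert_py_alt (n : Int) (x : Int) (y : Int) : Int :=
  let s := PySem.Int.floordiv n 2
  if _hs : s ≤ 0 then 0
  else
    let rx : Int := if 0 < PySem.Int.band x s then 1 else 0
    let ry : Int := if 0 < PySem.Int.band y s then 1 else 0
    let p : Int × Int :=
      if ry = 0 then
        let q : Int × Int := if rx = 1 then (s - 1 - x, s - 1 - y) else (x, y)
        (q.2, q.1)
      else (x, y)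
    s * s * PySem.Int.bxor (3 * rx) ry + xy_to_hilbert_py_alt s p.1 p.2
termination_by n.toNat
decreasing_by
  have h2 : PySem.Int.floordiv n 2 = n / 2 :=
    PySem.Int.floordiv_eq_ediv_of_pos (by omega : (0:Int) < 2)
  omega

-- ===== PRECONDITION & SPEC =====
def Spec_xy_to_hilbert_py (n : Int) (x : Int) (y : Int) (out : Int) : Prop := out = xy_to_hilbert_py_alt n x y
instance (n : Int) (x : Int) (y : Int) (out : Int) : Decidable (Spec_xy_to_hilbert_py n x y out) := by unfold Spec_xy_to_hilbert_py; infer_instance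

-- ===== CLAIM (what is proved, stated in full; the proofs are below) =====
def Claim_equal_xy_to_hilbert_py : Prop := ∀ (n : Int) (x : Int) (y : Int), Dom_xy_to_hilbert_py n x y → Spec_xy_to_hilbert_py n x y (xy_to_hilbert_py n x y)

-- ===== LEMMAS AND PROOFS =====

theorem fdiv_two_double (s : Int) : PySem.Int.floordiv (2 * s) 2 = s := by
  rw [PySem.Int.floordiv_eq_ediv_of_pos (by omega : (0:Int) < 2)]
  omega

-- B's result depends on n only through n // 2
theorem alt_congr (n m x y : Int) (h : PySem.Int.floordiv n 2 = PySem.Int.floordiv m 2) :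
    xy_to_hilbert_py_alt n x y = xy_to_hilbert_py_alt m x y := by
  rw [xy_to_hilbert_py_alt.eq_def, xy_to_hilbert_py_alt.eq_def, h]

-- each loop iteration of A is one recursive frame of B
theorem loopA_eq_alt : ∀ (k : Nat) (s x y d : Int), s.toNat ≤ k →
    hilbLoopA s x y d = d + xy_to_hilbert_py_alt (2 * s) x y := by
  intro k
  induction k with
  | zero =>
    intro s x y d hk
    rw [hilbLoopA, xy_to_hilbert_py_alt.eq_def, fdiv_two_double]
    have hs : ¬ (0 < s) := by omega
    simp [hs, (by omega : s ≤ 0)]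
  | succ k ih =>
    intro s x y d hk
    rw [hilbLoopA, xy_to_hilbert_py_alt.eq_def, fdiv_two_double]
    by_cases hs : 0 < s
    · rw [dif_pos hs, dif_neg (show ¬ s ≤ 0 by omega)]
      rw [ih (PySem.Int.floordiv s 2) _ _ _
        (by rw [PySem.Int.floordiv_eq_ediv_of_pos (by omega : (0:Int) < 2)]; omega)]
      rw [alt_congr (2 * PySem.Int.floordiv s 2) s _ _ (by rw [fdiv_two_double])]
      ring
    · simp [hs, (by omega : s ≤ 0)]

-- ===== VERDICT (by name: the statement is the Claim_ definition above) =====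
theorem xy_to_hilbert_py_spec : Claim_equal_xy_to_hilbert_py := by
  intro n x y _
  unfold Spec_xy_to_hilbert_py xy_to_hilbert_py
  rw [loopA_eq_alt (PySem.Int.floordiv n 2).toNat _ _ _ _ le_rfl,
    alt_congr (2 * PySem.Int.floordiv n 2) n _ _ (by rw [fdiv_two_double])]
  ring
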